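-- pv_equiv track=rewrite | github.com/LautaroGarcia15/Python-Programs-University | TP 3/ejercicio5.py | butacas_contiguas
-- ===== SOURCE A (Python) =====
-- def butacas_contiguas(matriz_aleatoria):
--     contiguas_max = 0
--     contiguas_actuales = 0
--
--     for f in range(len(matriz_aleatoria)):
--         for c in range(len(matriz_aleatoria[0])):
--             if matriz_aleatoria[f][c] == 0:
--                 contiguas_actuales += 1
--             else:
--                 contiguas_max = max(contiguas_actuales, contiguas_max)
--                 contiguas_actuales = 0
--
--     return contiguas_max
-- ===== SOURCE B (Python) =====
-- def butacas_contiguas(matriz_aleatoria):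
--     # Gap-between-nonzeros formulation: flatten in row-major order (width of
--     # row 0, as A indexes), record positions of nonzero cells, and return the
--     # largest gap between consecutive nonzero positions.
--     w = len(matriz_aleatoria[0]) if matriz_aleatoria else 0
--     flat = [matriz_aleatoria[f][c] for f in range(len(matriz_aleatoria)) for c in range(w)]
--     nonzeros = [i for i, x in enumerate(flat) if x != 0]
--     best = 0
--     prev = -1
--     for i in nonzeros:
--         best = max(best, i - prev - 1)
--         prev = i
--     return best
-- ===== Notes on version B (the rewrite author's own statement) =====
-- stated objective: alternative
-- what changed: Replaces A's per-cell running counter with a gap-based algorithm: flatten the matrix row-major, collect the positions of nonzero cells, and return the maximum gap between consecutive nonzero positions (which reproduces A's cross-row runs and its ignoring of a trailing zero tail naturally).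
import Mathlib
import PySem

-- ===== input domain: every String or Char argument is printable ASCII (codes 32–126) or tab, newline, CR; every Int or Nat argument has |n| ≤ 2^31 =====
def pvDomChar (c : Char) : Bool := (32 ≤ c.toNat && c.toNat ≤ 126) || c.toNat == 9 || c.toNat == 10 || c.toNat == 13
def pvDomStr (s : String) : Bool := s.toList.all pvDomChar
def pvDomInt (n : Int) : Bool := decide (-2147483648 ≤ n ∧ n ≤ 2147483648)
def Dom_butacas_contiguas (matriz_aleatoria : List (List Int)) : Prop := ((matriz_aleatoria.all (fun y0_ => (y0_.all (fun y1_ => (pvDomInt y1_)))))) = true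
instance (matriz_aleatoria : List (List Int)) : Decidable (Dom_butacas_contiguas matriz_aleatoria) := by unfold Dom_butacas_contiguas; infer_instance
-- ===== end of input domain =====

-- B replaces A's per-cell running counter with a gap-between-nonzero-positions scan
-- over the flattened matrix (objective: alternative decomposition of equal cost).


-- ===== PORT A =====
def butacas_contiguas (matriz_aleatoria : List (List Int)) : Int :=
  let st := (PySem.List.pyRange 0 (matriz_aleatoria.length : Int) 1).foldl
    (fun st f =>
      (PySem.List.pyRange 0 ((PySem.List.pyGetD matriz_aleatoria 0 []).length : Int) 1).foldl
        (fun st c =>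
          if PySem.List.pyGetD (PySem.List.pyGetD matriz_aleatoria f []) c 0 = 0 then
            (st.1, st.2 + 1)
          else
            (max st.2 st.1, 0))
        st)
    ((0 : Int), (0 : Int))
  st.1

-- ===== PORT B =====
def butacas_contiguas_alt (matriz_aleatoria : List (List Int)) : Int :=
  let w : Nat := (matriz_aleatoria.headD []).length
  let flat := (PySem.List.pyRange 0 (matriz_aleatoria.length : Int) 1).flatMap
    (fun f => (PySem.List.pyRange 0 (w : Int) 1).map
      (fun c => PySem.List.pyGetD (PySem.List.pyGetD matriz_aleatoria f []) c 0))
  let nonzeros := (PySem.List.enumerate flat).filterMap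
    (fun p => if p.2 ≠ 0 then some p.1 else none)
  (nonzeros.foldl (fun st i => (max st.1 (i - st.2 - 1), i)) ((0 : Int), (-1 : Int))).1

-- ===== PRECONDITION & SPEC =====
-- Pre_ excludes exactly the inputs where Python A raises IndexError: a row shorter
-- than row 0 (A indexes every row up to len(matriz[0])).  B raises there too.
def Pre_butacas_contiguas (matriz_aleatoria : List (List Int)) : Prop :=
  ∀ r ∈ matriz_aleatoria, (matriz_aleatoria.headD []).length ≤ r.length
instance (matriz_aleatoria : List (List Int)) : Decidable (Pre_butacas_contiguas matriz_aleatoria) := by unfold Pre_butacas_contiguas; infer_instance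
def pvWitness_butacas_contiguas : List (List Int) := [[0, 1], [1, 0, 0]]

def Spec_butacas_contiguas (matriz_aleatoria : List (List Int)) (out : Int) : Prop := out = butacas_contiguas_alt matriz_aleatoria
instance (matriz_aleatoria : List (List Int)) (out : Int) : Decidable (Spec_butacas_contiguas matriz_aleatoria out) := by unfold Spec_butacas_contiguas; infer_instance

-- ===== CLAIM (what is proved, stated in full; the proofs are below) =====
def Claim_equal_butacas_contiguas : Prop := ∀ (matriz_aleatoria : List (List Int)), Dom_butacas_contiguas matriz_aleatoria → Pre_butacas_contiguas matriz_aleatoria → Spec_butacas_contiguas matriz_aleatoria (butacas_contiguas matriz_aleatoria)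

-- ===== LEMMAS AND PROOFS =====

-- A's counter step and B's gap step, named for the proofs.
def pvAstep (st : Int × Int) (v : Int) : Int × Int :=
  if v = 0 then (st.1, st.2 + 1) else (max st.2 st.1, 0)
def pvBstep (st : Int × Int) (i : Int) : Int × Int :=
  (max st.1 (i - st.2 - 1), i)
def pvNz (l : List Int) (s : Int) : List Int :=
  (PySem.List.enumerate l s).filterMap (fun p => if p.2 ≠ 0 then some p.1 else none)

theorem pvNz_nil (s : Int) : pvNz [] s = [] := by
  simp [pvNz, PySem.List.enumerate_nil]

theorem pvNz_cons (x : Int) (l : List Int) (s : Int) :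
    pvNz (x :: l) s = (if x ≠ 0 then [s] else []) ++ pvNz l (s + 1) := by
  simp only [pvNz, PySem.List.enumerate_cons, List.filterMap_cons]
  by_cases h : x = 0 <;> simp [h]

-- core: the counter scan and the gap scan agree, for any accumulators with
-- prev = s - cur - 1.
theorem pv_core (l : List Int) (s mx cur : Int) :
    (l.foldl pvAstep (mx, cur)).1 = ((pvNz l s).foldl pvBstep (mx, s - cur - 1)).1 := by
  induction l generalizing s mx cur with
  | nil => simp [pvNz_nil]
  | cons x l ih =>
    by_cases h : x = 0
    · subst h
      rw [pvNz_cons]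
      simp only [ne_eq, not_true_eq_false, if_false, List.nil_append, List.foldl_cons]
      rw [show pvAstep (mx, cur) 0 = (mx, cur + 1) from by simp [pvAstep]]
      rw [ih (s + 1) mx (cur + 1), show s + 1 - (cur + 1) - 1 = s - cur - 1 from by ring]
    · rw [pvNz_cons]
      simp only [ne_eq, h, not_false_eq_true, if_true, List.singleton_append, List.foldl_cons]
      rw [show pvAstep (mx, cur) x = (max cur mx, 0) from by simp [pvAstep, h]]
      have h1 : pvBstep (mx, s - cur - 1) s = (max cur mx, s) := by
        simp only [pvBstep]
        rw [show s - (s - cur - 1) - 1 = cur from by ring, max_comm]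
      rw [h1, ih (s + 1) (max cur mx) 0, show s + 1 - 0 - 1 = s from by ring]

-- per-row: under the width bound, indexing range(w) into a row is the row's take w
theorem pv_row_map (row : List Int) (w : Nat) (hw : w ≤ row.length) :
    (PySem.List.pyRange 0 (w : Int) 1).map (fun c => PySem.List.pyGetD row c 0)
      = row.take w := by
  have hlen : (row.take w).length = w := by simp [hw]
  have h1 : (PySem.List.pyRange 0 ((row.take w).length : Int) 1).map
      (fun c => PySem.List.pyGetD (row.take w) c 0) = row.take w :=
    PySem.List.map_pyGetD_pyRange_zero _ _
  rw [hlen] at h1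
  rw [← h1]
  apply List.map_congr_left
  intro c hc
  rw [PySem.List.mem_pyRange_one] at hc
  rw [PySem.List.pyGetD_eq_getElem row 0 hc.1 (by omega),
      PySem.List.pyGetD_eq_getElem (row.take w) 0 hc.1 (by push_cast [hlen]; omega)]
  rw [List.getElem_take]

theorem pv_rows_map (m : List (List Int)) (g : List Int → List Int) :
    (PySem.List.pyRange 0 (m.length : Int) 1).map (fun f => g (PySem.List.pyGetD m f []))
      = m.map g := by
  conv_rhs => rw [← PySem.List.map_pyGetD_pyRange_zero m ([] : List Int)]
  rw [List.map_map]
  rfl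

theorem pv_flatTake (m : List (List Int)) (w : Nat) (hw : ∀ r ∈ m, w ≤ r.length) :
    (PySem.List.pyRange 0 (m.length : Int) 1).flatMap
        (fun f => (PySem.List.pyRange 0 (w : Int) 1).map
          (fun c => PySem.List.pyGetD (PySem.List.pyGetD m f []) c 0))
      = m.flatMap (fun r => r.take w) := by
  rw [List.flatMap_def, List.flatMap_def]
  have h1 := pv_rows_map m
    (fun r => (PySem.List.pyRange 0 (w : Int) 1).map (fun c => PySem.List.pyGetD r c 0))
  simp only at h1
  rw [h1]
  congr 1
  apply List.map_congr_left
  intro r hr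
  exact pv_row_map r w (hw r hr)

theorem pv_foldl_flatMap (m : List (List Int)) (g : List Int → List Int)
    (st : Int × Int) :
    (m.flatMap g).foldl pvAstep st
      = m.foldl (fun st r => (g r).foldl pvAstep st) st := by
  induction m generalizing st with
  | nil => rfl
  | cons r m ih => simp [List.flatMap_cons, List.foldl_append, ih]

theorem pv_A_flat (m : List (List Int)) (hw : ∀ r ∈ m, (m.headD []).length ≤ r.length) :
    butacas_contiguas m
      = ((m.flatMap (fun r => r.take (m.headD []).length)).foldl pvAstep ((0:Int), (0:Int))).1 := by
  have hw0 : PySem.List.pyGetD m 0 ([] : List Int) = m.headD [] := by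
    cases m <;> simp [PySem.List.pyGetD_zero]
  show ((PySem.List.pyRange 0 (m.length : Int) 1).foldl
      (fun st f =>
        (PySem.List.pyRange 0 ((PySem.List.pyGetD m 0 ([] : List Int)).length : Int) 1).foldl
          (fun st c => pvAstep st (PySem.List.pyGetD (PySem.List.pyGetD m f []) c 0)) st)
      ((0 : Int), (0 : Int))).1 = _
  rw [hw0]
  rw [PySem.List.foldl_pyRange_zero_pyGetD' m ([] : List Int)
      (fun st row =>
        (PySem.List.pyRange 0 ((m.headD []).length : Int) 1).foldl
          (fun st c => pvAstep st (PySem.List.pyGetD row c 0)) st)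
      ((0 : Int), (0 : Int))]
  rw [pv_foldl_flatMap]
  congr 1
  apply PySem.List.foldl_congr_mem
  intro st row hrow
  rw [← pv_row_map row _ (hw row hrow), List.foldl_map]

-- ===== VERDICT (by name: the statement is the Claim_ definition above) =====
theorem butacas_contiguas_spec : Claim_equal_butacas_contiguas := by
  intro m _ hpre
  unfold Spec_butacas_contiguas
  show butacas_contiguas m =
    (((PySem.List.enumerate
          ((PySem.List.pyRange 0 (m.length : Int) 1).flatMap
            (fun f => (PySem.List.pyRange 0 ((m.headD []).length : Int) 1).map
              (fun c => PySem.List.pyGetD (PySem.List.pyGetD m f []) c 0)))).filterMap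
        (fun p => if p.2 ≠ 0 then some p.1 else none)).foldl
      (fun st i => (max st.1 (i - st.2 - 1), i)) ((0 : Int), (-1 : Int))).1
  rw [pv_flatTake m _ hpre, pv_A_flat m hpre]
  have hc := pv_core (m.flatMap (fun r => r.take (m.headD []).length)) 0 0 0
  rw [show (0 : Int) - 0 - 1 = -1 from by norm_num] at hc
  exact hc
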